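-- pv_equiv track=rewrite | github.com/Nocteln/sujet_bac | sujet_27/exo1.py | recherche_min
-- ===== SOURCE A (Python) =====
-- def recherche_min(tab):
--     min = 0
--     if len(tab) == 1:
--         return tab[0]
--     else:
--         for k in range(len(tab)):
--             if tab[k] < tab[k-1]:
--                 min=k
--         return min
-- ===== SOURCE B (Python) =====
-- def recherche_min(tab):
--     if len(tab) == 1:
--         return tab[0]
--     for k in range(len(tab) - 1, -1, -1):
--         if tab[k] < tab[k-1]:
--             return k
--     return 0
-- ===== Notes on version B (the rewrite author's own statement) =====
-- stated objective: faster
-- what changed: Replaces the forward full scan that keeps overwriting the result with a backward scan that returns at the first index k with tab[k] < tab[k-1] (equal to the forward loop's last overwrite), keeping the len==1 guard and the k=0 wraparound comparison.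
import Mathlib
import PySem

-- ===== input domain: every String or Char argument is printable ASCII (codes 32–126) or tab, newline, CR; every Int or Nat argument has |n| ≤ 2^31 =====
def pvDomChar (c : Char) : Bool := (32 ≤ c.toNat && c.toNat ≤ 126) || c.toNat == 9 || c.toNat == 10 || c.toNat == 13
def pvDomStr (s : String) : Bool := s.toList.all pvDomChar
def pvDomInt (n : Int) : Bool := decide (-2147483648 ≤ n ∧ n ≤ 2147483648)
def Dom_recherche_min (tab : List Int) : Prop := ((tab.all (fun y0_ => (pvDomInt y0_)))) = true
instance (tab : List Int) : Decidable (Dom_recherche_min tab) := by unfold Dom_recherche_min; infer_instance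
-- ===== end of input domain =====

-- B replaces A's forward last-overwrite scan by a backward first-match scan with early exit (same values on every input).

-- ===== PORT A =====
-- indices k and k-1 are always in Python's valid range here (k-1 = -1 wraps to the last element), so pyGetD's default is never used
def recherche_min (tab : List Int) : Int :=
  if tab.length == 1 then PySem.List.pyGetD tab 0 0
  else (PySem.List.pyRange 0 tab.length 1).foldl
    (fun m k => if PySem.List.pyGetD tab k 0 < PySem.List.pyGetD tab (k-1) 0 then k else m) 0

-- ===== PORT B =====
-- backward while-loop: argument is the number of indices still to try; i+1 means current index is i
def rmAltGo (tab : List Int) : Nat → Int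
  | 0 => 0
  | i+1 =>
    if PySem.List.pyGetD tab (i : Int) 0 < PySem.List.pyGetD tab ((i : Int) - 1) 0 then (i : Int)
    else rmAltGo tab i

def recherche_min_alt (tab : List Int) : Int :=
  if tab.length == 1 then PySem.List.pyGetD tab 0 0
  else rmAltGo tab tab.length

-- ===== PRECONDITION & SPEC =====
def Spec_recherche_min (tab : List Int) (out : Int) : Prop := out = recherche_min_alt tab
instance (tab : List Int) (out : Int) : Decidable (Spec_recherche_min tab out) := by unfold Spec_recherche_min; infer_instance

-- ===== CLAIM (what is proved, stated in full; the proofs are below) =====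
def Claim_equal_recherche_min : Prop := ∀ (tab : List Int), Dom_recherche_min tab → Spec_recherche_min tab (recherche_min tab)

-- ===== LEMMAS AND PROOFS =====
theorem rm_foldl_eq_altGo (tab : List Int) (n : Nat) :
    (PySem.List.pyRange 0 (n : Int) 1).foldl
      (fun m k => if PySem.List.pyGetD tab k 0 < PySem.List.pyGetD tab (k-1) 0 then k else m) 0
    = rmAltGo tab n := by
  induction n with
  | zero => simp [rmAltGo]
  | succ i ih =>
    have h : ((i : Int) + 1) = ((i + 1 : Nat) : Int) := by push_cast; ring
    rw [← h, PySem.List.pyRange_one_succ_right (by positivity), List.foldl_append, ih]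
    simp [rmAltGo]

-- ===== VERDICT (by name: the statement is the Claim_ definition above) =====
theorem recherche_min_spec : Claim_equal_recherche_min := by
  intro tab _
  unfold Spec_recherche_min recherche_min recherche_min_alt
  by_cases h : tab.length == 1
  · simp [h]
  · simp [h, rm_foldl_eq_altGo]
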